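-- pv_equiv track=rewrite | github.com/martingerlach/physicists-papers-on-natural-language | code_paperpile.py | cleanup_author
-- ===== SOURCE A (Python) =====
-- def cleanup_author(s):
--     """Clean up and format author names.
--
--     cleanup_author(str) -> str
--     """
--
-- #     dictionary = {'\\"a': '&auml;', '\\"A': '&Auml;', '\\"e': '&euml;',
-- #     '\\"E': '&Euml;', '\\"i': '&iuml;', '\\"I': '&Iuml;', '\\"o': '&ouml;',
-- #     '\\"O': '&Ouml;', '\\"u': '&uuml;', '\\"U': '&Uuml;', "\\'a": '&aacute;',
-- #     "\\'A": '&Aacute;', "\\'e": '&eacute;', "\\'i": '&iacute;',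
-- #     "\\'I": '&Iacute;', "\\'E": '&Eacute;', "\\'o": '&oacute;',
-- #     "\\'O": '&Oacute;', "\\'u": '&uacute;', "\\'U": '&Uacute;',
-- #     '\\~n': '&ntilde;', '\\~N': '&Ntilde;', '\\~a': '&atilde;',
-- #     '\\~A': '&Atilde;', '\\~o': '&otilde;', '\\~O': '&Otilde;',
-- #     '.': ' ', "\\'\\": '', '{': '', '}': '', ' And ': ' and '}
--     dictionary = {'\\"{a}': '&auml;', '\\"{A}': '&Auml;', '\\"{e}': '&euml;',
--     '\\"{E}': '&Euml;', '\\"{i}': '&iuml;', '\\"{I}': '&Iuml;', '\\"{o}': '&ouml;',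
--     '\\"{O}': '&Ouml;', '\\"{u}': '&uuml;', '\\"{U}': '&Uuml;', "\\'{a}": '&aacute;',
--     "\\'{A}": "&Aacute;", "\\'{e}": '&eacute;', "\\'{i}": '&iacute;', "\\'{\i}": '&iacute;',
--     "\\'{I}": '&Iacute;', "\\'{E}": '&Eacute;', "\\'{o}": '&oacute;',
--     "\\'{O}": '&Oacute;', "\\'{u}": '&uacute;', "\\'{U}": '&Uacute;',
--     '\\~{n}': '&ntilde;','\\~{N}': '&Ntilde',  '\\~{a}': '&atilde;',
--     '\\~{A}': '&Atilde;', '\\~{o}': '&otilde;', '\\~{O}': '&Otilde;',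
--     "\\'{c}": '&#263;', "\\'{C}":'&#262;',
--     "\\c{c}" :'&ccedil;',"\\c{C}" :'&Ccedil;',
--     '.': ' ', "\\'\\": '',  ' And ': ' and ',
--     "\xe2\x80\x99" : "'"}#','{': '', '}': '',
--
--     dictionary_2 = {'{': '', '}': '',"\\":""}#second dict so that temp order
--
--     for k, v in dictionary.items():
-- #         print k,v
--         s = s.replace(k, v)
--
--     for k, v in dictionary_2.items():
-- #         print k,v
--         s = s.replace(k, v)
--
--
--     names = s.split(' and ')
--     s = ''
--     for i in range(len(names)):
--         sur, sep, fore = names[i].partition(',')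
--         fore_=''
--         for n in fore.split(' '):
--             try:
--                 if n[0]=='&':
--                     fore_+= n[:n.index(';')]
--                 else:
--                     fore_+= n[0].upper()
--             except IndexError:
--                 pass
-- #         names[i] = fore+' '+sur
--         name_ = fore_+' '+sur
--         if i == 0:
--             s += name_
--         elif i < len(names) - 1:
--             s += ', '+name_
--         elif i==len(names)-1 and len(names)==2:
--             s += ' and '+name_
--         else:
--             s += ', and '+name_
--
--
-- #     before, sep, after = s.rpartition(' and ')
-- #     before = before.replace(' and ', ', ')
-- #     s = before + sep + after
--
--     return s
-- ===== SOURCE B (Python) =====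
-- _D1 = {'\\"{a}': '&auml;', '\\"{A}': '&Auml;', '\\"{e}': '&euml;',
--     '\\"{E}': '&Euml;', '\\"{i}': '&iuml;', '\\"{I}': '&Iuml;', '\\"{o}': '&ouml;',
--     '\\"{O}': '&Ouml;', '\\"{u}': '&uuml;', '\\"{U}': '&Uuml;', "\\'{a}": '&aacute;',
--     "\\'{A}": "&Aacute;", "\\'{e}": '&eacute;', "\\'{i}": '&iacute;', "\\'{\i}": '&iacute;',
--     "\\'{I}": '&Iacute;', "\\'{E}": '&Eacute;', "\\'{o}": '&oacute;',
--     "\\'{O}": '&Oacute;', "\\'{u}": '&uacute;', "\\'{U}": '&Uacute;',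
--     '\\~{n}': '&ntilde;', '\\~{N}': '&Ntilde', '\\~{a}': '&atilde;',
--     '\\~{A}': '&Atilde;', '\\~{o}': '&otilde;', '\\~{O}': '&Otilde;',
--     "\\'{c}": '&#263;', "\\'{C}": '&#262;',
--     "\\c{c}": '&ccedil;', "\\c{C}": '&Ccedil;',
--     '.': ' ', "\\'\\": '', ' And ': ' and ',
--     "\xe2\x80\x99": "'"}
--
-- _D2 = {'{': '', '}': '', "\\": ""}
--
--
-- def _initials(fore):
--     # one index-driven scan over fore: skip spaces, take each token's initial in place
--     out = []
--     i, m = 0, len(fore)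
--     while i < m:
--         if fore[i] == ' ':
--             i += 1
--             continue
--         j = i
--         while j < m and fore[j] != ' ':
--             j += 1
--         tok = fore[i:j]
--         if tok[0] == '&':
--             out.append(tok[:tok.index(';')])
--         else:
--             out.append(tok[0].upper())
--         i = j
--     return ''.join(out)
--
--
-- def _format(name):
--     # find the first comma by scanning; no comma means an empty forename part
--     for k, ch in enumerate(name):
--         if ch == ',':
--             return _initials(name[k + 1:]) + ' ' + name[:k]
--     return ' ' + name
--
--
-- def cleanup_author(s):
--     for k, v in _D1.items():
--         s = s.replace(k, v)
--     for k, v in _D2.items():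
--         s = s.replace(k, v)
--
--     fs = [_format(n) for n in s.split(' and ')]
--     if len(fs) == 1:
--         return fs[0]
--     if len(fs) == 2:
--         return fs[0] + ' and ' + fs[1]
--     # three or more: assemble back-to-front
--     out = ', and ' + fs[-1]
--     for f in reversed(fs[1:-1]):
--         out = ', ' + f + out
--     return fs[0] + out
-- ===== Notes on version B (the rewrite author's own statement) =====
-- stated objective: alternative
-- what changed: B keeps the two replacement phases but reworks the formatting: initials come from one index-driven character scan over the forename (instead of split-on-space plus a per-token loop with IndexError handling), the surname/forename split is a forward scan for the first comma (instead of partition), and for three or more names the output is assembled back-to-front from the last name (instead of A's single interleaved format-and-join loop over range(len(names))).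
import Mathlib
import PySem

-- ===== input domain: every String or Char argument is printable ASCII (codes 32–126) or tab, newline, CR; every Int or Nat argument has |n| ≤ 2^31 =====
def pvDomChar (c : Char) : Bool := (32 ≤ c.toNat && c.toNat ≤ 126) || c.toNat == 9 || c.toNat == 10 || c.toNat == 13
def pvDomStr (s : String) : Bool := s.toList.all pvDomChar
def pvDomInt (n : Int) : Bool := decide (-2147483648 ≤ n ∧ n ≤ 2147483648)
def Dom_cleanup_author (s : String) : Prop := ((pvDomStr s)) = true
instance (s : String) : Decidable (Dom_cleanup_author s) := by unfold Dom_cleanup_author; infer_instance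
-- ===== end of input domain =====

-- B keeps the two replacement phases but reworks the formatting: an index-driven character scan
-- builds each forename's initials (instead of split+per-token loop), the comma split is a single
-- forward scan (instead of partition), and for three or more names the output is assembled
-- back-to-front from the last name (objective: alternative; same cost).

-- ===== PORT A =====
-- The two replacement tables and the replacement phases are textually identical in A and B,
-- so they are shared helpers of both ports.
def pvDict1 : List (List Char × List Char) := [
  ("\\\"{a}".toList, "&auml;".toList), ("\\\"{A}".toList, "&Auml;".toList),
  ("\\\"{e}".toList, "&euml;".toList), ("\\\"{E}".toList, "&Euml;".toList),
  ("\\\"{i}".toList, "&iuml;".toList), ("\\\"{I}".toList, "&Iuml;".toList),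
  ("\\\"{o}".toList, "&ouml;".toList), ("\\\"{O}".toList, "&Ouml;".toList),
  ("\\\"{u}".toList, "&uuml;".toList), ("\\\"{U}".toList, "&Uuml;".toList),
  ("\\'{a}".toList, "&aacute;".toList), ("\\'{A}".toList, "&Aacute;".toList),
  ("\\'{e}".toList, "&eacute;".toList), ("\\'{i}".toList, "&iacute;".toList),
  ("\\'{\\i}".toList, "&iacute;".toList), ("\\'{I}".toList, "&Iacute;".toList),
  ("\\'{E}".toList, "&Eacute;".toList), ("\\'{o}".toList, "&oacute;".toList),
  ("\\'{O}".toList, "&Oacute;".toList), ("\\'{u}".toList, "&uacute;".toList),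
  ("\\'{U}".toList, "&Uacute;".toList), ("\\~{n}".toList, "&ntilde;".toList),
  ("\\~{N}".toList, "&Ntilde".toList), ("\\~{a}".toList, "&atilde;".toList),
  ("\\~{A}".toList, "&Atilde;".toList), ("\\~{o}".toList, "&otilde;".toList),
  ("\\~{O}".toList, "&Otilde;".toList), ("\\'{c}".toList, "&#263;".toList),
  ("\\'{C}".toList, "&#262;".toList), ("\\c{c}".toList, "&ccedil;".toList),
  ("\\c{C}".toList, "&Ccedil;".toList), (".".toList, " ".toList),
  ("\\'\\".toList, "".toList), (" And ".toList, " and ".toList),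
  ("\u00E2\u0080\u0099".toList, "'".toList)]

def pvDict2 : List (List Char × List Char) :=
  [("{".toList, "".toList), ("}".toList, "".toList), ("\\".toList, "".toList)]

def pvReplacePhase (tbl : List (List Char × List Char)) (s : List Char) : List Char :=
  tbl.foldl (fun s kv => PySem.Chars.replace s kv.1 kv.2) s

def pvClean (s : String) : List Char :=
  pvReplacePhase pvDict2 (pvReplacePhase pvDict1 s.toList)

-- A's `sur, sep, fore = names[i].partition(',')` (hand port, exact for the 1-char separator ','):
-- sur is everything before the first ',', fore everything after it ('' if there is no ',').
def pvPartition (name : List Char) : List Char × List Char :=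
  (name.takeWhile (fun c => c ≠ ','), (name.dropWhile (fun c => c ≠ ',')).drop 1)

-- A's inner loop: fore_ accumulated by string concatenation; `except IndexError: pass` skips the
-- empty token; in the `none` branch Python raises ValueError (n.index(';')) — excluded by Pre_.
def pvForeA : List (List Char) → List Char → List Char
  | [], acc => acc
  | [] :: rest, acc => pvForeA rest acc
  | (c :: cs) :: rest, acc =>
      pvForeA rest (acc ++
        (if c = '&' then
          match PySem.List.index? (c :: cs) ';' with
          | some j => (c :: cs).take j
          | none => []
        else [PySem.Chars.upperChar c]))

def pvNameA (name : List Char) : List Char :=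
  let p := pvPartition name
  pvForeA (PySem.Chars.splitOn p.2 [' ']) [] ++ [' '] ++ p.1

-- A's single loop over `range(len(names))`, formatting and joining into the accumulator s.
def pvLoopA (L : Nat) : Nat → List (List Char) → List Char → List Char
  | _, [], s => s
  | i, name :: rest, s =>
      pvLoopA L (i + 1) rest
        (if i = 0 then s ++ pvNameA name
         else if i < L - 1 then s ++ ", ".toList ++ pvNameA name
         else if i = L - 1 ∧ L = 2 then s ++ " and ".toList ++ pvNameA name
         else s ++ ", and ".toList ++ pvNameA name)

def cleanup_author (s : String) : String :=
  String.ofList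
    (pvLoopA (PySem.Chars.splitOn (pvClean s) " and ".toList).length 0
      (PySem.Chars.splitOn (pvClean s) " and ".toList) [])

-- ===== PORT B =====
-- the initial taken from one nonempty token (B's `tok[0]=='&'` branch; the `none` branch is
-- Python's ValueError from tok.index(';') — excluded by Pre_)
def pvInitTok (n : List Char) : List Char :=
  match n with
  | [] => []
  | c :: cs =>
      if c = '&' then
        match PySem.List.index? (c :: cs) ';' with
        | some j => (c :: cs).take j
        | none => []
      else [PySem.Chars.upperChar c]

-- B's `_initials` while loop (hand port of the index scan as recursion on the suffix, exact):
-- skip a space, else the token is fore[i:j] = takeWhile, and the scan resumes at j = dropWhile.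
def pvScanB : List Char → List (List Char)
  | [] => []
  | c :: rest =>
      if h : c = ' ' then pvScanB rest
      else
        pvInitTok ((c :: rest).takeWhile (fun x => x ≠ ' ')) ::
          pvScanB ((c :: rest).dropWhile (fun x => x ≠ ' '))
  termination_by l => l.length
  decreasing_by
  · simp
  · simp [List.dropWhile, h]
    exact List.length_dropWhile_le _ _

def pvInitialsB (fore : List Char) : List Char :=
  PySem.Chars.join [] (pvScanB fore)

-- B's `_format` comma scan (hand port of the enumerate loop, exact): the first ',' splits the
-- name; no ',' means an empty forename part.
def pvSplitComma : List Char → Option (List Char × List Char)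
  | [] => none
  | c :: rest =>
      if c = ',' then some ([], rest)
      else
        match pvSplitComma rest with
        | none => none
        | some p => some (c :: p.1, p.2)

def pvFormatB (name : List Char) : List Char :=
  match pvSplitComma name with
  | some p => pvInitialsB p.2 ++ [' '] ++ p.1
  | none => [' '] ++ name

-- B's final assembly: length cases, and for ≥ 3 names a back-to-front fold over reversed fs[1:-1].
def pvJoinB (fs : List (List Char)) : List Char :=
  if fs.length = 1 then PySem.List.pyGetD fs 0 []
  else if fs.length = 2 then
    PySem.List.pyGetD fs 0 [] ++ " and ".toList ++ PySem.List.pyGetD fs 1 []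
  else
    PySem.List.pyGetD fs 0 [] ++
      (PySem.List.slice fs (some 1) (some (-1))).reverse.foldl
        (fun out f => ", ".toList ++ f ++ out)
        (", and ".toList ++ PySem.List.pyGetD fs (-1) [])

def cleanup_author_alt (s : String) : String :=
  String.ofList (pvJoinB ((PySem.Chars.splitOn (pvClean s) " and ".toList).map pvFormatB))

-- ===== PRECONDITION & SPEC =====
def pvTokOk (tok : List Char) : Bool :=
  match tok with
  | '&' :: _ => tok.contains ';'
  | _ => true

-- Pre_ excludes exactly the inputs on which A raises ValueError: those where, after the two
-- replacement phases, some space-separated forename token starts with '&' but contains no ';'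
-- (so n.index(';') fails); B raises the same ValueError on exactly those inputs.
def Pre_cleanup_author (s : String) : Prop :=
  ((PySem.Chars.splitOn (pvClean s) " and ".toList).all (fun name =>
    (PySem.Chars.splitOn (pvPartition name).2 [' ']).all pvTokOk)) = true
instance (s : String) : Decidable (Pre_cleanup_author s) := by
  unfold Pre_cleanup_author; infer_instance

def pvWitness_cleanup_author : String := "Gerlach, Martin and Smith, J."

def Spec_cleanup_author (s : String) (out : String) : Prop := out = cleanup_author_alt s
instance (s : String) (out : String) : Decidable (Spec_cleanup_author s out) := by
  unfold Spec_cleanup_author; infer_instance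

-- ===== CLAIM (what is proved, stated in full; the proofs are below) =====
def Claim_equal_cleanup_author : Prop :=
  ∀ (s : String), Dom_cleanup_author s → Pre_cleanup_author s →
    Spec_cleanup_author s (cleanup_author s)

-- ===== LEMMAS AND PROOFS =====

theorem pv_join_nil (l : List (List Char)) : PySem.Chars.join [] l = l.flatten := by
  simp [PySem.Chars.join, List.intercalate]
  induction l with
  | nil => simp
  | cons a l ih => cases l <;> simp_all [List.intersperse]

-- A's fold over the split tokens, characterised: the initials of the nonempty tokens, joined.
theorem pv_foreA_eq (toks : List (List Char)) (acc : List Char) :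
    pvForeA toks acc =
      acc ++ PySem.Chars.join [] ((toks.filter (fun n => !n.isEmpty)).map pvInitTok) := by
  induction toks generalizing acc with
  | nil => simp [pvForeA]
  | cons n rest ih =>
      cases n with
      | nil => simp [pvForeA, ih]
      | cons c cs => simp [pvForeA, ih, pvInitTok, pv_join_nil]

-- splitOn with the one-character separator ' ', as a structural recursion.
def pvSplitSp (l : List Char) : List (List Char) :=
  l.takeWhile (fun x => x ≠ ' ') ::
    (match h : l.dropWhile (fun x => x ≠ ' ') with
     | [] => []
     | _ :: r => pvSplitSp r)
  termination_by l.length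
  decreasing_by
    have := List.length_dropWhile_le (fun x : Char => x ≠ ' ') l
    rw [h] at this
    simp at this
    omega

theorem pvSplitSp_eq (l : List Char) :
    pvSplitSp l =
      l.takeWhile (fun x => x ≠ ' ') ::
        (match l.dropWhile (fun x => x ≠ ' ') with
         | [] => []
         | _ :: r => pvSplitSp r) := by
  rw [pvSplitSp.eq_def]
  cases h : l.dropWhile (fun x => x ≠ ' ') <;> simp

theorem pv_splitOn_go_sp (fuel : Nat) (l cur : List Char) (acc : List (List Char))
    (hf : l.length < fuel) :
    PySem.Chars.splitOn.go [' '] fuel l cur acc =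
      acc.reverse ++ (cur.reverse ++ l.takeWhile (fun x => x ≠ ' ')) ::
        (match l.dropWhile (fun x => x ≠ ' ') with
         | [] => []
         | _ :: r => pvSplitSp r) := by
  induction fuel generalizing l cur acc with
  | zero => omega
  | succ fuel ih =>
      cases l with
      | nil => simp [PySem.Chars.splitOn.go]
      | cons c rest =>
          rw [PySem.Chars.splitOn.go]
          by_cases hc : c = ' '
          · subst hc
            rw [if_pos (by simp [List.isPrefixOf])]
            rw [ih _ _ _ (by simpa using Nat.lt_of_succ_lt_succ hf)]
            simp [List.takeWhile, List.dropWhile, pvSplitSp_eq rest]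
          · rw [if_neg (by simp [List.isPrefixOf]; exact fun h => hc h.symm)]
            rw [ih _ _ _ (by simpa using Nat.lt_of_succ_lt_succ hf)]
            simp [List.takeWhile, List.dropWhile, hc]

theorem pv_splitOn_sp (l : List Char) :
    PySem.Chars.splitOn l [' '] = pvSplitSp l := by
  rw [PySem.Chars.splitOn, pv_splitOn_go_sp _ _ _ _ (by omega), pvSplitSp_eq]
  simp

-- B's scan yields exactly the initials of the nonempty tokens of the split.
theorem pv_scanB_eq (l : List Char) :
    pvScanB l = ((pvSplitSp l).filter (fun t => !t.isEmpty)).map pvInitTok := by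
  induction l using pvScanB.induct with
  | case1 => simp [pvScanB, pvSplitSp_eq]
  | case2 rest ih =>
      simp only [pvScanB]
      rw [ih, pvSplitSp_eq (' ' :: rest)]
      simp [List.takeWhile, List.dropWhile]
  | case3 c rest hc ih =>
      rw [show pvScanB (c :: rest)
            = pvInitTok ((c :: rest).takeWhile (fun x => x ≠ ' ')) ::
                pvScanB ((c :: rest).dropWhile (fun x => x ≠ ' ')) from by
        simp [pvScanB, hc]]
      conv_rhs => rw [pvSplitSp_eq]
      rw [ih]
      cases hd : (c :: rest).dropWhile (fun x => decide (x ≠ ' ')) with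
      | nil => simp [pvSplitSp_eq, List.takeWhile, hc]
      | cons d r =>
          have hdsp : d = ' ' := by
            have h2 := List.head_dropWhile_not (fun x : Char => decide (x ≠ ' '))
              (l := c :: rest) (by rw [hd]; simp)
            simp only [hd] at h2
            simpa using h2
          subst hdsp
          simp [pvSplitSp_eq (' ' :: r), List.takeWhile, List.dropWhile, hc]

-- B's comma scan, characterised by takeWhile/dropWhile (A's partition).
theorem pv_splitComma_eq (name : List Char) :
    pvSplitComma name =
      if ',' ∈ name then
        some (name.takeWhile (fun c => c ≠ ','), (name.dropWhile (fun c => c ≠ ',')).drop 1)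
      else none := by
  induction name with
  | nil => simp [pvSplitComma]
  | cons c rest ih =>
      by_cases hc : c = ','
      · subst hc; simp [pvSplitComma, List.takeWhile, List.dropWhile]
      · rw [pvSplitComma, if_neg hc, ih]
        by_cases hm : ',' ∈ rest
        · simp [hm, hc, List.takeWhile, List.dropWhile, Ne.symm hc]
        · simp [hm, hc, Ne.symm hc]

-- per-name agreement: B's format equals A's
theorem pv_name_eq (name : List Char) : pvFormatB name = pvNameA name := by
  rw [pvFormatB, pv_splitComma_eq]
  by_cases hm : ',' ∈ name
  · rw [if_pos hm]
    rw [pvNameA]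
    simp only [pvPartition]
    rw [pv_foreA_eq, pvInitialsB, pv_scanB_eq, pv_splitOn_sp]
    simp
  · rw [if_neg hm, pvNameA]
    simp only [pvPartition]
    rw [pv_foreA_eq]
    have h1 : name.takeWhile (fun c => c ≠ ',') = name :=
      List.takeWhile_eq_self_iff.mpr (fun x hx => by
        simp only [decide_eq_true_eq]
        exact fun hEq => hm (hEq ▸ hx))
    have h2 : name.dropWhile (fun c => c ≠ ',') = [] :=
      List.dropWhile_eq_nil_iff.mpr (fun x hx => by
        simp only [decide_eq_true_eq]
        exact fun hEq => hm (hEq ▸ hx))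
    rw [h2, h1]
    rw [show (([] : List Char).drop 1) = [] from rfl]
    rw [pv_splitOn_sp, pvSplitSp_eq]
    simp

theorem pv_splitOn_sp_and_ne_nil (s sep : List Char) : PySem.Chars.splitOn s sep ≠ [] := by
  have : ∀ (sep : List Char) (fuel : Nat) (l cur : List Char) (acc : List (List Char)),
      PySem.Chars.splitOn.go sep fuel l cur acc ≠ [] := by
    intro sep fuel
    induction fuel with
    | zero => intro l cur acc; simp [PySem.Chars.splitOn.go]
    | succ fuel ih =>
        intro l cur acc
        cases l with
        | nil => simp [PySem.Chars.splitOn.go]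
        | cons c rest =>
            rw [PySem.Chars.splitOn.go]
            split
            · exact ih _ _ _
            · exact ih _ _ _
  exact this _ _ _ _ _

-- Python's  xs[1:-1]  on a nonempty list is the tail without its last element.
theorem pv_slice_one_neg_one {α : Type} (a : α) (rest : List α) :
    PySem.List.slice (a :: rest) (some 1) (some (-1)) = rest.dropLast := by
  simp [PySem.List.slice, PySem.List.clampIdx, List.dropLast_eq_take]
  split <;> omega

-- B's back-to-front fold, characterised left-to-right.
theorem pv_foldl_rev (mid : List (List Char)) (base : List Char) :
    mid.reverse.foldl (fun out f => ", ".toList ++ f ++ out) base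
      = (mid.map (fun n => ", ".toList ++ n)).flatten ++ base := by
  rw [List.foldl_reverse]
  induction mid with
  | nil => simp
  | cons x mid ih =>
      simp only [List.foldr_cons, List.map_cons, List.flatten_cons, ih]
      simp

-- A's loop from index 1 ≤ i on the non-initial names, when there are at least three names in all.
theorem pv_loopA_tail (L : Nat) (mid : List (List Char)) (last : List Char)
    (i : Nat) (s : List Char) (hi : 1 ≤ i) (hlen : i + (mid.length + 1) = L) (hL : 3 ≤ L) :
    pvLoopA L i (mid ++ [last]) s =
      s ++ (mid.map (fun n => ", ".toList ++ pvNameA n)).flatten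
        ++ ", and ".toList ++ pvNameA last := by
  induction mid generalizing i s with
  | nil =>
      simp only [List.length_nil] at hlen
      have h0 : i ≠ 0 := by omega
      have h1 : ¬ i < L - 1 := by omega
      have h2 : ¬ (i = L - 1 ∧ L = 2) := by omega
      simp [pvLoopA, h0, h1, h2]
  | cons x mid ih =>
      have h0 : i ≠ 0 := by omega
      have h1 : i < L - 1 := by
        simp only [List.length_cons] at hlen; omega
      rw [List.cons_append, pvLoopA, if_neg h0, if_pos h1]
      rw [ih (i + 1) _ (by omega) (by simp only [List.length_cons] at hlen ⊢; omega)]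
      simp

theorem pv_main (names : List (List Char)) (hne : names ≠ []) :
    pvLoopA names.length 0 names [] = pvJoinB (names.map pvFormatB) := by
  match names with
  | [] => exact absurd rfl hne
  | [n] => simp [pvLoopA, pvJoinB, pv_name_eq, PySem.List.pyGetD_zero_cons]
  | [n, m] =>
      have e1 : PySem.List.pyGetD [pvFormatB n, pvFormatB m] ((1 : Nat) : Int) [] = pvFormatB m := by
        rw [PySem.List.pyGetD_natCast]; rfl
      simp only [List.map_cons, List.map_nil]
      rw [pvJoinB, if_neg (by simp), if_pos (by simp)]
      rw [PySem.List.pyGetD_zero_cons]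
      rw [show (1 : Int) = ((1 : Nat) : Int) from rfl, e1]
      simp [pvLoopA, pv_name_eq]
  | n :: m :: k :: rest =>
      have h1 : ((n :: m :: k :: rest).map pvFormatB).length ≠ 1 := by simp
      have h2 : ((n :: m :: k :: rest).map pvFormatB).length ≠ 2 := by simp
      rw [pvJoinB, if_neg h1, if_neg h2]
      -- left side: peel off i = 0, then use the tail lemma on the tail m :: k :: rest
      have htne : (m :: k :: rest) ≠ [] := by simp
      have hdec : (m :: k :: rest).dropLast ++ [(m :: k :: rest).getLast htne]
          = m :: k :: rest := List.dropLast_append_getLast htne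
      rw [pvLoopA, if_pos rfl]
      rw [show pvLoopA (n :: m :: k :: rest).length (0 + 1) (m :: k :: rest) ([] ++ pvNameA n)
            = pvLoopA (n :: m :: k :: rest).length 1
                ((m :: k :: rest).dropLast ++ [(m :: k :: rest).getLast htne]) (pvNameA n) from by
        rw [hdec]; simp]
      rw [pv_loopA_tail _ _ _ 1 _ (le_refl 1)
        (by have := congrArg List.length hdec; simp at this ⊢; omega) (by simp)]
      -- right side
      rw [show ((n :: m :: k :: rest).map pvFormatB)
            = pvFormatB n :: ((m :: k :: rest).map pvFormatB) from by simp]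
      rw [pv_slice_one_neg_one]
      rw [PySem.List.pyGetD_neg_one (pvFormatB n :: (m :: k :: rest).map pvFormatB) [] (by simp)]
      rw [PySem.List.pyGetD_zero_cons]
      rw [pv_foldl_rev]
      have hmapdl : ((m :: k :: rest).map pvFormatB).dropLast
          = (m :: k :: rest).dropLast.map pvFormatB := by rw [List.map_dropLast]
      have hmapgl : (pvFormatB n :: (m :: k :: rest).map pvFormatB).getLast (by simp)
          = pvFormatB ((m :: k :: rest).getLast htne) := by
        rw [List.getLast_cons (by simp)]
        exact List.getLast_map _
      rw [hmapdl, hmapgl]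
      simp [pv_name_eq, Function.comp_def]

-- ===== VERDICT (by name: the statement is the Claim_ definition above) =====
theorem cleanup_author_spec : Claim_equal_cleanup_author := by
  intro s _ _
  unfold Spec_cleanup_author cleanup_author cleanup_author_alt
  rw [pv_main _ (pv_splitOn_sp_and_ne_nil _ _)]
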